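-- pv_equiv track=rewrite | github.com/ts4044/dataengineering | Assignment 2 and 3/code_copy.py | calculate_keltner_intersection
-- ===== SOURCE A (Python) =====
-- def calculate_keltner_intersection(value_list, kbands):
--     count = 0
--
--     for i in range(1, len(value_list)):
--         # For each value
--         for band in kbands:
--             # For each band value, check if the line from previous value to current value
--             # crosses the keltner band. If yes, increase count
--             if value_list[i - 1] < band < value_list[i]:
--                 count += 1
--             elif value_list[i - 1] > band > value_list[i]:
--                 count += 1
--
--     return count
-- ===== SOURCE B (Python) =====
-- def _bisect_left(a, x):
--     # standard binary search: first index i with a[i] >= x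
--     lo, hi = 0, len(a)
--     while lo < hi:
--         mid = (lo + hi) // 2
--         if a[mid] < x:
--             lo = mid + 1
--         else:
--             hi = mid
--     return lo
--
--
-- def _bisect_right(a, x):
--     # first index i with a[i] > x
--     lo, hi = 0, len(a)
--     while lo < hi:
--         mid = (lo + hi) // 2
--         if x < a[mid]:
--             hi = mid
--         else:
--             lo = mid + 1
--     return lo
--
--
-- def calculate_keltner_intersection(value_list, kbands):
--     # Sort the bands once; for each consecutive pair the number of bands
--     # strictly between the two values is found by two binary searches.
--     s = sorted(kbands)
--     count = 0
--     for prev, cur in zip(value_list, value_list[1:]):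
--         if prev == cur:
--             continue
--         lo, hi = (prev, cur) if prev < cur else (cur, prev)
--         count += _bisect_left(s, hi) - _bisect_right(s, lo)
--     return count
-- ===== Notes on version B (the rewrite author's own statement) =====
-- stated objective: faster
-- what changed: Instead of scanning every band for every consecutive pair, B sorts the bands once and counts the bands strictly between each pair of consecutive values with two binary searches (bisect_left/bisect_right).
import Mathlib
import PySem

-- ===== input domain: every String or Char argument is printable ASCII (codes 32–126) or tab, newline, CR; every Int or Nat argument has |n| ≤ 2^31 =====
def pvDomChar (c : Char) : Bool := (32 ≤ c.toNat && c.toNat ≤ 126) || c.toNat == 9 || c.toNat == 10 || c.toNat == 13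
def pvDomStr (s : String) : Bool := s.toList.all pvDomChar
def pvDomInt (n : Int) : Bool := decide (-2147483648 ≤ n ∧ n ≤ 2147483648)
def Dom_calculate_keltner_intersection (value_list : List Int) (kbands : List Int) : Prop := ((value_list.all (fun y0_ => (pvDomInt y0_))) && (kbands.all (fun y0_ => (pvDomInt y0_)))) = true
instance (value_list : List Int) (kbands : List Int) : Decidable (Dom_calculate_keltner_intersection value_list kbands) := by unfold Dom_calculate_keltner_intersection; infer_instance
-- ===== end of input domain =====

-- B sorts the bands once and counts bands strictly between each consecutive pair with two
-- binary searches (O((n+m) log m)) instead of A's per-pair scan of all bands (O(n*m)).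


-- ===== PORT A =====
-- for i in range(1, len(value_list)): for band in kbands: two chained strict-comparison tests
def calculate_keltner_intersection (value_list : List Int) (kbands : List Int) : Int :=
  (PySem.List.pyRange 1 (value_list.length : Int) 1).foldl (fun count i =>
    kbands.foldl (fun c band =>
      if PySem.List.pyGetD value_list (i - 1) 0 < band ∧ band < PySem.List.pyGetD value_list i 0 then
        c + 1
      else if PySem.List.pyGetD value_list (i - 1) 0 > band ∧ band > PySem.List.pyGetD value_list i 0 then
        c + 1
      else c) count) 0

-- ===== PORT B =====
-- Source B's hand-written _bisect_left/_bisect_right are the standard CPython bisect algorithms,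
-- ported as the prelude's primitives PySem.List.bisectLeft / bisectRight (same algorithm).
def calculate_keltner_intersection_alt (value_list : List Int) (kbands : List Int) : Int :=
  let s := PySem.List.sorted kbands (fun x => x)
  (value_list.zip (PySem.List.slice value_list (some 1) none)).foldl (fun count p =>
    if p.1 = p.2 then count
    else
      let lo := if p.1 < p.2 then p.1 else p.2
      let hi := if p.1 < p.2 then p.2 else p.1
      count + ((PySem.List.bisectLeft s hi : Int) - (PySem.List.bisectRight s lo : Int))) 0

-- ===== PRECONDITION & SPEC =====
def Spec_calculate_keltner_intersection (value_list : List Int) (kbands : List Int) (out : Int) : Prop := out = calculate_keltner_intersection_alt value_list kbands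
instance (value_list : List Int) (kbands : List Int) (out : Int) : Decidable (Spec_calculate_keltner_intersection value_list kbands out) := by unfold Spec_calculate_keltner_intersection; infer_instance

-- ===== CLAIM (what is proved, stated in full; the proofs are below) =====
def Claim_equal_calculate_keltner_intersection : Prop := ∀ (value_list : List Int) (kbands : List Int), Dom_calculate_keltner_intersection value_list kbands → Spec_calculate_keltner_intersection value_list kbands (calculate_keltner_intersection value_list kbands)

-- ===== LEMMAS AND PROOFS =====

-- a predicate that is true exactly on the first k positions of a list has countP = k
theorem countP_eq_of_threshold (s : List Int) (p : Int → Bool) (k : Nat)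
    (hk : k ≤ s.length) (h : ∀ (j : Nat) (hj : j < s.length), p s[j] = decide (j < k)) :
    s.countP p = k := by
  induction s generalizing k with
  | nil =>
    simp only [List.length_nil, Nat.le_zero] at hk
    simp [hk]
  | cons a t ih =>
    rcases k with _ | k'
    · have ha : p a = false := by simpa using h 0 (by simp)
      have ht : t.countP p = 0 := ih 0 (by omega) (by
        intro j hj; simpa using h (j + 1) (by simpa using Nat.succ_lt_succ hj))
      simp [ha, ht]
    · have ha : p a = true := by simpa using h 0 (by simp)
      have ht : t.countP p = k' := ih k' (by simpa using hk) (by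
        intro j hj
        have := h (j + 1) (by simpa using Nat.succ_lt_succ hj)
        simpa using this)
      simp [ha, ht]

theorem bisectLeft_eq_countP (s : List Int) (hs : s.Pairwise (· ≤ ·)) (x : Int) :
    PySem.List.bisectLeft s x = s.countP (fun b => decide (b < x)) := by
  obtain ⟨hle, hlt, hge⟩ := PySem.List.bisectLeft_spec s x hs
  refine (countP_eq_of_threshold s _ _ hle ?_).symm
  intro j hj
  by_cases hjk : j < PySem.List.bisectLeft s x
  · simp [hjk, hlt j hj hjk]
  · have := hge j hj (by omega)
    simp [hjk]; omega

theorem bisectRight_eq_countP (s : List Int) (hs : s.Pairwise (· ≤ ·)) (x : Int) :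
    PySem.List.bisectRight s x = s.countP (fun b => decide (b ≤ x)) := by
  obtain ⟨hle, hlt, hge⟩ := PySem.List.bisectRight_spec s x hs
  refine (countP_eq_of_threshold s _ _ hle ?_).symm
  intro j hj
  by_cases hjk : j < PySem.List.bisectRight s x
  · simp [hjk, hlt j hj hjk]
  · have := hge j hj (by omega)
    simp [hjk]; omega

-- #(b < hi) − #(b ≤ lo) = #(lo < b < hi) when lo < hi
theorem countP_sub_eq (l : List Int) (lo hi : Int) (h : lo < hi) :
    (l.countP (fun b => decide (b < hi)) : Int) - (l.countP (fun b => decide (b ≤ lo)) : Int)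
      = (l.countP (fun b => decide (lo < b ∧ b < hi)) : Int) := by
  induction l with
  | nil => simp
  | cons a t ih =>
    simp only [List.countP_cons, decide_eq_true_eq]
    split_ifs <;> push_cast <;> omega

-- the generic reindexing: an index loop over consecutive positions is a fold over zip with tail
theorem range_map_eq_zip_tail (F : Int → Int → Int) (l : List Int) :
    (List.range (l.length - 1)).map (fun k => F (l.getD k 0) (l.getD (k + 1) 0))
      = (l.zip l.tail).map (fun p => F p.1 p.2) := by
  induction l with
  | nil => simp
  | cons a t ih =>
    cases t with
    | nil => simp
    | cons b t' =>
      have hl : (a :: b :: t').length - 1 = ((b :: t').length - 1) + 1 := by simp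
      rw [hl, List.range_succ_eq_map, List.map_cons, List.map_map]
      have hcomp : ((fun k => F ((a :: b :: t').getD k 0) ((a :: b :: t').getD (k + 1) 0)) ∘ Nat.succ)
          = fun k => F ((b :: t').getD k 0) ((b :: t').getD (k + 1) 0) := by
        funext k; simp
      rw [hcomp, ih]
      simp

-- per-pair value: A's crossing count over kbands equals B's bisect difference on sorted kbands
theorem pair_eq (kbands : List Int) (x y : Int) :
    (kbands.countP (fun b => decide ((x < b ∧ b < y) ∨ (x > b ∧ b > y))) : Int)
      = (if x = y then (0 : Int)
         else ((PySem.List.bisectLeft (PySem.List.sorted kbands (fun v => v)) (if x < y then y else x) : Int)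
               - (PySem.List.bisectRight (PySem.List.sorted kbands (fun v => v)) (if x < y then x else y) : Int))) := by
  set s := PySem.List.sorted kbands (fun v => v) with hs
  have hpw : s.Pairwise (· ≤ ·) := PySem.List.sorted_pairwise kbands (fun v => v)
  have hperm : s.Perm kbands := PySem.List.sorted_perm kbands (fun v => v) false
  by_cases hxy : x = y
  · subst hxy
    rw [if_pos rfl]
    have hz : kbands.countP (fun b => decide ((x < b ∧ b < x) ∨ (x > b ∧ b > x))) = 0 :=
      List.countP_eq_zero.2 (by intro b _; simp; omega)
    rw [hz]
    simp
  · rw [if_neg hxy]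
    rcases lt_or_gt_of_ne hxy with hlt | hgt
    · rw [if_pos hlt, if_pos hlt,
        bisectLeft_eq_countP s hpw y, bisectRight_eq_countP s hpw x,
        hperm.countP_eq, hperm.countP_eq, countP_sub_eq kbands x y hlt]
      congr 1
      apply List.countP_congr; intro b _
      simp; omega
    · rw [if_neg (by omega), if_neg (by omega),
        bisectLeft_eq_countP s hpw x, bisectRight_eq_countP s hpw y,
        hperm.countP_eq, hperm.countP_eq, countP_sub_eq kbands y x hgt]
      congr 1
      apply List.countP_congr; intro b _
      simp; omega

-- ===== VERDICT (by name: the statement is the Claim_ definition above) =====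
theorem calculate_keltner_intersection_spec : Claim_equal_calculate_keltner_intersection := by
  intro value_list kbands _
  show _ = _
  unfold calculate_keltner_intersection calculate_keltner_intersection_alt
  -- A: inner band loop is a countP, outer index loop is a sum over the range
  have innerA : ∀ (c : Int) (x y : Int),
      kbands.foldl (fun c band =>
        if x < band ∧ band < y then c + 1
        else if x > band ∧ band > y then c + 1 else c) c
        = c + (kbands.countP (fun b => decide ((x < b ∧ b < y) ∨ (x > b ∧ b > y))) : Int) := by
    intro c x y
    have hfun : (fun (c : Int) (band : Int) =>
        if x < band ∧ band < y then c + 1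
        else if x > band ∧ band > y then c + 1 else c)
        = fun c band => if (x < band ∧ band < y) ∨ (x > band ∧ band > y) then c + 1 else c := by
      funext c band; split_ifs <;> tauto
    rw [hfun, PySem.List.foldl_ite_add_one]
  simp only [innerA]
  have hBfun : (fun (count : Int) (p : Int × Int) =>
      if p.1 = p.2 then count
      else count + ((PySem.List.bisectLeft (PySem.List.sorted kbands (fun x => x)) (if p.1 < p.2 then p.2 else p.1) : Int)
            - (PySem.List.bisectRight (PySem.List.sorted kbands (fun x => x)) (if p.1 < p.2 then p.1 else p.2) : Int)))
      = fun count p => count +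
          (if p.1 = p.2 then 0
           else ((PySem.List.bisectLeft (PySem.List.sorted kbands (fun x => x)) (if p.1 < p.2 then p.2 else p.1) : Int)
            - (PySem.List.bisectRight (PySem.List.sorted kbands (fun x => x)) (if p.1 < p.2 then p.1 else p.2) : Int))) := by
    funext c p; split_ifs <;> simp
  rw [PySem.List.foldl_add, hBfun, PySem.List.foldl_add]
  congr 1
  -- reduce both index expressions to the generic zip form
  rw [PySem.List.pyRange_one, List.map_map, PySem.List.slice_from_one]
  have key := range_map_eq_zip_tail
    (fun u v => (kbands.countP (fun b => decide ((u < b ∧ b < v) ∨ (u > b ∧ b > v))) : Int))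
    value_list
  have hlen : ((value_list.length : Int) - 1).toNat = value_list.length - 1 := by omega
  calc ((List.range ((value_list.length : Int) - 1).toNat).map
          ((fun i => (kbands.countP (fun b =>
              decide ((PySem.List.pyGetD value_list (i - 1) 0 < b ∧ b < PySem.List.pyGetD value_list i 0)
                ∨ (PySem.List.pyGetD value_list (i - 1) 0 > b ∧ b > PySem.List.pyGetD value_list i 0))) : Int))
            ∘ fun (k : Nat) => 1 + (k : Int))).sum
      = ((List.range (value_list.length - 1)).map (fun k =>
          (fun u v => (kbands.countP (fun b => decide ((u < b ∧ b < v) ∨ (u > b ∧ b > v))) : Int))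
            (value_list.getD k 0) (value_list.getD (k + 1) 0))).sum := by
        rw [hlen]
        congr 1
        apply List.map_congr_left
        intro k _
        simp only [Function.comp]
        have e1 : (1 : Int) + (k : Int) - 1 = (k : Int) := by ring
        have e2 : (1 : Int) + (k : Int) = ((k + 1 : Nat) : Int) := by push_cast; ring
        have e3 : ((k + 1 : Nat) : Int) - 1 = ((k : Nat) : Int) := by push_cast; ring
        simp only [e2, e3, PySem.List.pyGetD_natCast]
    _ = ((value_list.zip value_list.tail).map (fun p =>
          (kbands.countP (fun b => decide ((p.1 < b ∧ b < p.2) ∨ (p.1 > b ∧ b > p.2))) : Int))).sum := by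
        rw [key]
    _ = _ := by
        congr 1
        apply List.map_congr_left
        intro p _
        rw [pair_eq kbands p.1 p.2]
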